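-- pv_equiv track=rewrite | github.com/dfhampshire/RInChI | rinchi_tools/molecule.py | _generate_permutation_sets
-- ===== SOURCE A (Python) =====
-- from collections import Counter, deque
--
-- def _generate_permutation_sets(ring):
--     ring_perms = []
--     ring_d = deque(ring)
--     for __ in range(2):
--         for _ in range(len(ring)):
--             ring_perms.append("".join(ring_d))
--             ring_d.rotate()
--         ring_d.reverse()
--     return ring_perms[0], set(ring_perms)
-- ===== SOURCE B (Python) =====
-- def _generate_permutation_sets(ring):
--     s = list(ring)
--     n = len(s)
--     doubled = s + s
--     r = s[::-1]
--     rev = r + r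
--     perms = ["".join(doubled[i:i + n]) for i in range(n, 0, -1)]
--     perms += ["".join(rev[i:i + n]) for i in range(n, 0, -1)]
--     return perms[0], set(perms)
-- ===== Notes on version B (the rewrite author's own statement) =====
-- stated objective: simpler
-- what changed: Replaces the stateful deque rotate/reverse simulation with two sliding windows over a doubled list (s+s for rotations, reversed s doubled for reflections), built as comprehensions.
import Mathlib
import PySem

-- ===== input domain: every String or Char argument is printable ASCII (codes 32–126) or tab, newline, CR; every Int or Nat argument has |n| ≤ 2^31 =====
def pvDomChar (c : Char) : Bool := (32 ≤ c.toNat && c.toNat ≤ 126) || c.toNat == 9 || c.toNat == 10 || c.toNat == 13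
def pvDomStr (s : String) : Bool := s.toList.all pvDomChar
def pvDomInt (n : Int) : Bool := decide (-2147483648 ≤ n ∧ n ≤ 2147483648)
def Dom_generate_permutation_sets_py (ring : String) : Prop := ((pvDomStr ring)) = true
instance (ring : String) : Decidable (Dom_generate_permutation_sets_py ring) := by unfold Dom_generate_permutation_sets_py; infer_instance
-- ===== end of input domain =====

-- B replaces A's stateful deque rotate/reverse simulation with sliding windows over
-- doubled lists (a different data representation of the same permutation family); objective: simpler.


-- ===== PORT A =====
-- deque.rotate(): move the last element to the front (no-op on the empty deque)
def pvRotR (d : List Char) : List Char :=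
  match d.getLast? with
  | none => []
  | some c => c :: d.dropLast

def generate_permutation_sets_py (ring : String) : String × List String :=
  -- state: (ring_perms, ring_d); 'for __ in range(2)' / 'for _ in range(len(ring))' as foldls
  let st := (List.range 2).foldl (fun st _ =>
      let st2 := (List.range ring.toList.length).foldl
        (fun st _ => (st.1 ++ [String.ofList st.2], pvRotR st.2)) st
      (st2.1, st2.2.reverse)) (([] : List String), ring.toList)
  -- ring_perms[0]: IndexError on the empty ring, excluded by Pre_; headD's default is never used there
  (st.1.headD "", PySem.Set.ofList st.1)

-- ===== PORT B =====
def generate_permutation_sets_py_alt (ring : String) : String × List String :=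
  let s := ring.toList
  let n := s.length
  let doubled := s ++ s
  let r := s.reverse          -- s[::-1] (exact: PySem.List.slice?_none_none_neg_one)
  let rev := r ++ r
  let perms :=
    ((PySem.List.pyRange n 0 (-1)).map
      (fun i => String.ofList (PySem.List.slice doubled (some i) (some (i + n))))) ++
    ((PySem.List.pyRange n 0 (-1)).map
      (fun i => String.ofList (PySem.List.slice rev (some i) (some (i + n)))))
  -- perms[0]: IndexError on the empty ring, excluded by Pre_
  (perms.headD "", PySem.Set.ofList perms)

-- ===== PRECONDITION & SPEC =====
-- Pre_ excludes only the empty string, on which both A and B raise IndexError (perms[0]).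
def Pre_generate_permutation_sets_py (ring : String) : Prop := ring ≠ ""
instance (ring : String) : Decidable (Pre_generate_permutation_sets_py ring) := by unfold Pre_generate_permutation_sets_py; infer_instance
def pvWitness_generate_permutation_sets_py : String := "ab"

def Spec_generate_permutation_sets_py (ring : String) (out : String × List String) : Prop := out = generate_permutation_sets_py_alt ring
instance (ring : String) (out : String × List String) : Decidable (Spec_generate_permutation_sets_py ring out) := by unfold Spec_generate_permutation_sets_py; infer_instance

-- ===== CLAIM (what is proved, stated in full; the proofs are below) =====
def Claim_equal_generate_permutation_sets_py : Prop := ∀ (ring : String), Dom_generate_permutation_sets_py ring → Pre_generate_permutation_sets_py ring → Spec_generate_permutation_sets_py ring (generate_permutation_sets_py ring)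

-- ===== LEMMAS AND PROOFS =====

-- A's inner loop appends the joins of successive right-rotations and leaves the n-fold rotation.
theorem pvInner_eq (n : Nat) (acc : List String) (d : List Char) :
    (List.range n).foldl (fun st (_ : Nat) => (st.1 ++ [String.ofList st.2], pvRotR st.2)) (acc, d)
      = (acc ++ (List.range n).map (fun k => String.ofList (pvRotR^[k] d)), pvRotR^[n] d) := by
  induction n with
  | zero => simp
  | succ m ih =>
    rw [List.range_succ, List.foldl_append, ih]
    simp [Function.iterate_succ_apply']

-- k-fold right rotation in closed form.
theorem pvRotR_iterate (s : List Char) (k : Nat) (hk : k ≤ s.length) :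
    pvRotR^[k] s = s.drop (s.length - k) ++ s.take (s.length - k) := by
  induction k with
  | zero => simp
  | succ m ih =>
    have hm : m ≤ s.length := Nat.le_of_succ_le hk
    have hj : s.length - (m + 1) < s.length := by omega
    rw [Function.iterate_succ_apply', ih hm]
    have hsm : s.length - m = (s.length - (m + 1)) + 1 := by omega
    rw [hsm, List.take_add_one, List.getElem?_eq_getElem hj]
    simp only [Option.toList_some]
    rw [show s.drop (s.length - (m+1) + 1) ++ (s.take (s.length - (m+1)) ++ [s[s.length - (m+1)]])
        = (s.drop (s.length - (m+1) + 1) ++ s.take (s.length - (m+1))) ++ [s[s.length - (m+1)]] by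
      simp [List.append_assoc]]
    simp only [pvRotR, List.getLast?_concat, List.dropLast_concat]
    rw [← List.cons_append, List.getElem_cons_drop]

-- B's window over a doubled list, in closed form.
theorem pvSlice_doubled (s : List Char) (i : Nat) (hi : i ≤ s.length) :
    PySem.List.slice (s ++ s) (some (i : Int)) (some ((i : Int) + (s.length : Int))) = s.drop i ++ s.take i := by
  rw [show ((i : Int) + (s.length : Int)) = ((i + s.length : Nat) : Int) by omega]
  rw [PySem.List.slice_natCast]
  rw [List.drop_append_of_le_length hi]
  have h1 : i + s.length - i = s.length := by omega
  rw [h1, List.take_append, List.take_of_length_le (by simp)]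
  have h2 : s.length - (List.drop i s).length = i := by simp; omega
  rw [h2]

theorem pvPhase_eq (s : List Char) :
    (PySem.List.pyRange s.length 0 (-1)).map
        (fun i => String.ofList (PySem.List.slice (s ++ s) (some i) (some (i + (s.length : Int)))))
      = (List.range s.length).map (fun k => String.ofList (pvRotR^[k] s)) := by
  rw [PySem.List.pyRange_neg_one]
  simp only [List.map_map]
  apply List.map_congr_left
  intro k hk
  have hk' : k < s.length := List.mem_range.mp hk
  have h1 : ((s.length : Int) - (k : Int)) = ((s.length - k : Nat) : Int) := by omega
  simp only [Function.comp_apply, h1]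
  rw [pvSlice_doubled s (s.length - k) (by omega)]
  rw [pvRotR_iterate s k (Nat.le_of_lt hk')]

theorem pvLists_eq (ring : String) :
    (let st := (List.range 2).foldl (fun st _ =>
        let st2 := (List.range ring.toList.length).foldl
          (fun st _ => (st.1 ++ [String.ofList st.2], pvRotR st.2)) st
        (st2.1, st2.2.reverse)) (([] : List String), ring.toList)
     st.1)
    = ((PySem.List.pyRange ring.toList.length 0 (-1)).map
        (fun i => String.ofList (PySem.List.slice (ring.toList ++ ring.toList) (some i) (some (i + (ring.toList.length : Int)))))) ++
      ((PySem.List.pyRange ring.toList.length 0 (-1)).map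
        (fun i => String.ofList (PySem.List.slice (ring.toList.reverse ++ ring.toList.reverse) (some i) (some (i + (ring.toList.length : Int)))))) := by
  set s := ring.toList with hs
  have h2 : List.range 2 = [0, 1] := by decide
  rw [h2]
  have hn : pvRotR^[s.length] s = s := by
    rw [pvRotR_iterate s s.length (le_refl _)]; simp
  simp only [List.foldl_cons, List.foldl_nil, pvInner_eq, hn, List.nil_append]
  rw [pvPhase_eq s]
  have : (PySem.List.pyRange s.length 0 (-1)).map
        (fun i => String.ofList (PySem.List.slice (s.reverse ++ s.reverse) (some i) (some (i + (s.length : Int)))))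
      = (List.range s.length).map (fun k => String.ofList (pvRotR^[k] s.reverse)) := by
    have := pvPhase_eq s.reverse
    simpa using this
  rw [this]

-- ===== VERDICT (by name: the statement is the Claim_ definition above) =====
theorem generate_permutation_sets_py_spec : Claim_equal_generate_permutation_sets_py := by
  intro ring _ _
  unfold Spec_generate_permutation_sets_py generate_permutation_sets_py generate_permutation_sets_py_alt
  have h := pvLists_eq ring
  simp only at h ⊢
  rw [h]
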